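-- pv_equiv track=rewrite | github.com/mannyluke4/warrior_bot | fix_sim_start.py | checkpoint_for
-- ===== SOURCE A (Python) =====
-- CHECKPOINTS = ["08:00", "08:30", "09:00", "09:30", "10:00", "10:30"]
--
-- def checkpoint_for(time_str: str) -> str:
--     """Map a HH:MM time string to the correct scanner checkpoint sim_start."""
--     if not time_str or time_str == "?":
--         return "07:00"
--     if time_str < "07:15":
--         return "07:00"
--     for cp in CHECKPOINTS:
--         if time_str <= cp:
--             return cp
--     return "10:30"  # beyond last checkpoint
-- ===== SOURCE B (Python) =====
-- CHECKPOINTS = ["08:00", "08:30", "09:00", "09:30", "10:00", "10:30"]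
--
-- def checkpoint_for(time_str: str) -> str:
--     """Map a HH:MM time string to the correct scanner checkpoint sim_start."""
--     if not time_str or time_str == "?":
--         return "07:00"
--     if time_str < "07:15":
--         return "07:00"
--     # binary search for the first checkpoint >= time_str (bisect_left by hand)
--     lo, hi = 0, len(CHECKPOINTS)
--     while lo < hi:
--         mid = (lo + hi) // 2
--         if CHECKPOINTS[mid] < time_str:
--             lo = mid + 1
--         else:
--             hi = mid
--     return CHECKPOINTS[lo] if lo < len(CHECKPOINTS) else "10:30"
-- ===== Notes on version B (the rewrite author's own statement) =====
-- stated objective: alternative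
-- what changed: The linear scan over the checkpoint list is replaced by a hand-written binary search (bisect_left) that locates the first checkpoint >= time_str; lexicographic order of the fixed-width HH:MM strings makes the two searches agree on every string.
import Mathlib
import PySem

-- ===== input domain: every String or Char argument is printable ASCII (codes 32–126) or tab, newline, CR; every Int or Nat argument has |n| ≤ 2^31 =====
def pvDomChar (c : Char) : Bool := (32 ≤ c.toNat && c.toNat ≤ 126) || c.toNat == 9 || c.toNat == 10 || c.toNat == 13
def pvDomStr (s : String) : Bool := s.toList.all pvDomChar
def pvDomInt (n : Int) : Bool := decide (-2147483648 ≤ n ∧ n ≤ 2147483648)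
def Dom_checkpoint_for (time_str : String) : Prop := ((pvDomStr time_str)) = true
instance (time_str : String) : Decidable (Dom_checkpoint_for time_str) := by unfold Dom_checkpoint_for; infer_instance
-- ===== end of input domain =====

-- B replaces A's linear scan over the checkpoint list with a hand-written
-- binary search (bisect_left) for the first checkpoint ≥ time_str; same results
-- because the fixed-width HH:MM checkpoints are sorted lexicographically.


-- ===== PORT A =====
-- string comparisons are done on .toList (code-point lexicographic = Python's str order)
def CHECKPOINTS : List String := ["08:00", "08:30", "09:00", "09:30", "10:00", "10:30"]

-- the for-loop over CHECKPOINTS: first cp with time_str ≤ cp, else "10:30"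
def scanA : List String → List Char → String
  | [], _ => "10:30"
  | cp :: rest, t => if t ≤ cp.toList then cp else scanA rest t

def checkpoint_for (time_str : String) : String :=
  if time_str.toList = [] ∨ time_str.toList = "?".toList then "07:00"
  else if time_str.toList < "07:15".toList then "07:00"
  else scanA CHECKPOINTS time_str.toList

-- ===== PORT B =====
-- the while-loop of Source B: bisect_left by hand over CHECKPOINTS
def bsearchB (t : List Char) (lo hi : Nat) : Nat :=
  if _h : lo < hi then
    let mid := (lo + hi) / 2
    if (CHECKPOINTS.getD mid "").toList < t then bsearchB t (mid + 1) hi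
    else bsearchB t lo mid
  else lo
termination_by hi - lo
decreasing_by all_goals omega

def checkpoint_for_alt (time_str : String) : String :=
  if time_str.toList = [] ∨ time_str.toList = "?".toList then "07:00"
  else if time_str.toList < "07:15".toList then "07:00"
  else
    let lo := bsearchB time_str.toList 0 CHECKPOINTS.length
    if lo < CHECKPOINTS.length then CHECKPOINTS.getD lo "10:30" else "10:30"

-- ===== PRECONDITION & SPEC =====
def Spec_checkpoint_for (time_str : String) (out : String) : Prop := out = checkpoint_for_alt time_str
instance (time_str : String) (out : String) : Decidable (Spec_checkpoint_for time_str out) := by unfold Spec_checkpoint_for; infer_instance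

-- ===== CLAIM (what is proved, stated in full; the proofs are below) =====
def Claim_equal_checkpoint_for : Prop := ∀ (time_str : String), Dom_checkpoint_for time_str → Spec_checkpoint_for time_str (checkpoint_for time_str)

-- ===== LEMMAS AND PROOFS =====

-- the two searches agree on every list of characters
theorem scan_eq_bsearch (t : List Char) :
    scanA CHECKPOINTS t =
      (if bsearchB t 0 CHECKPOINTS.length < CHECKPOINTS.length
       then CHECKPOINTS.getD (bsearchB t 0 CHECKPOINTS.length) "10:30" else "10:30") := by
  by_cases h0 : t ≤ (['0', '8', ':', '0', '0'] : List Char)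
  · have n0 : ¬ ((['0', '8', ':', '0', '0'] : List Char) < t) := not_lt.mpr h0
    have n1 : ¬ ((['0', '8', ':', '3', '0'] : List Char) < t) := not_lt.mpr (le_trans h0 (by decide : (['0', '8', ':', '0', '0'] : List Char) ≤ (['0', '8', ':', '3', '0'] : List Char)))
    have n2 : ¬ ((['0', '9', ':', '0', '0'] : List Char) < t) := not_lt.mpr (le_trans h0 (by decide : (['0', '8', ':', '0', '0'] : List Char) ≤ (['0', '9', ':', '0', '0'] : List Char)))
    have n3 : ¬ ((['0', '9', ':', '3', '0'] : List Char) < t) := not_lt.mpr (le_trans h0 (by decide : (['0', '8', ':', '0', '0'] : List Char) ≤ (['0', '9', ':', '3', '0'] : List Char)))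
    have n4 : ¬ ((['1', '0', ':', '0', '0'] : List Char) < t) := not_lt.mpr (le_trans h0 (by decide : (['0', '8', ':', '0', '0'] : List Char) ≤ (['1', '0', ':', '0', '0'] : List Char)))
    have n5 : ¬ ((['1', '0', ':', '3', '0'] : List Char) < t) := not_lt.mpr (le_trans h0 (by decide : (['0', '8', ':', '0', '0'] : List Char) ≤ (['1', '0', ':', '3', '0'] : List Char)))
    have hb : bsearchB t 0 6 = 0 := by
      rw [bsearchB]; simp [CHECKPOINTS, n0, n1, n2, n3, n4, n5]
      rw [bsearchB]; simp [CHECKPOINTS, n0, n1, n2, n3, n4, n5]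
      rw [bsearchB]; simp [CHECKPOINTS, n0, n1, n2, n3, n4, n5]
      rw [bsearchB]; simp
    simp [scanA, CHECKPOINTS, hb, h0]
  by_cases h1 : t ≤ (['0', '8', ':', '3', '0'] : List Char)
  · have p0 : (['0', '8', ':', '0', '0'] : List Char) < t := not_le.mp h0
    have n1 : ¬ ((['0', '8', ':', '3', '0'] : List Char) < t) := not_lt.mpr h1
    have n2 : ¬ ((['0', '9', ':', '0', '0'] : List Char) < t) := not_lt.mpr (le_trans h1 (by decide : (['0', '8', ':', '3', '0'] : List Char) ≤ (['0', '9', ':', '0', '0'] : List Char)))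
    have n3 : ¬ ((['0', '9', ':', '3', '0'] : List Char) < t) := not_lt.mpr (le_trans h1 (by decide : (['0', '8', ':', '3', '0'] : List Char) ≤ (['0', '9', ':', '3', '0'] : List Char)))
    have n4 : ¬ ((['1', '0', ':', '0', '0'] : List Char) < t) := not_lt.mpr (le_trans h1 (by decide : (['0', '8', ':', '3', '0'] : List Char) ≤ (['1', '0', ':', '0', '0'] : List Char)))
    have n5 : ¬ ((['1', '0', ':', '3', '0'] : List Char) < t) := not_lt.mpr (le_trans h1 (by decide : (['0', '8', ':', '3', '0'] : List Char) ≤ (['1', '0', ':', '3', '0'] : List Char)))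
    have hb : bsearchB t 0 6 = 1 := by
      rw [bsearchB]; simp [CHECKPOINTS, p0, n1, n2, n3, n4, n5]
      rw [bsearchB]; simp [CHECKPOINTS, p0, n1, n2, n3, n4, n5]
      rw [bsearchB]; simp [CHECKPOINTS, p0, n1, n2, n3, n4, n5]
      rw [bsearchB]; simp
    simp [scanA, CHECKPOINTS, hb, h0, h1]
  by_cases h2 : t ≤ (['0', '9', ':', '0', '0'] : List Char)
  · have p0 : (['0', '8', ':', '0', '0'] : List Char) < t := lt_of_le_of_lt (by decide : (['0', '8', ':', '0', '0'] : List Char) ≤ (['0', '8', ':', '3', '0'] : List Char)) (not_le.mp h1)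
    have p1 : (['0', '8', ':', '3', '0'] : List Char) < t := not_le.mp h1
    have n2 : ¬ ((['0', '9', ':', '0', '0'] : List Char) < t) := not_lt.mpr h2
    have n3 : ¬ ((['0', '9', ':', '3', '0'] : List Char) < t) := not_lt.mpr (le_trans h2 (by decide : (['0', '9', ':', '0', '0'] : List Char) ≤ (['0', '9', ':', '3', '0'] : List Char)))
    have n4 : ¬ ((['1', '0', ':', '0', '0'] : List Char) < t) := not_lt.mpr (le_trans h2 (by decide : (['0', '9', ':', '0', '0'] : List Char) ≤ (['1', '0', ':', '0', '0'] : List Char)))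
    have n5 : ¬ ((['1', '0', ':', '3', '0'] : List Char) < t) := not_lt.mpr (le_trans h2 (by decide : (['0', '9', ':', '0', '0'] : List Char) ≤ (['1', '0', ':', '3', '0'] : List Char)))
    have hb : bsearchB t 0 6 = 2 := by
      rw [bsearchB]; simp [CHECKPOINTS, p0, p1, n2, n3, n4, n5]
      rw [bsearchB]; simp [CHECKPOINTS, p0, p1, n2, n3, n4, n5]
      rw [bsearchB]; simp [CHECKPOINTS, p0, p1, n2, n3, n4, n5]
      rw [bsearchB]; simp
    simp [scanA, CHECKPOINTS, hb, h0, h1, h2]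
  by_cases h3 : t ≤ (['0', '9', ':', '3', '0'] : List Char)
  · have p0 : (['0', '8', ':', '0', '0'] : List Char) < t := lt_of_le_of_lt (by decide : (['0', '8', ':', '0', '0'] : List Char) ≤ (['0', '9', ':', '0', '0'] : List Char)) (not_le.mp h2)
    have p1 : (['0', '8', ':', '3', '0'] : List Char) < t := lt_of_le_of_lt (by decide : (['0', '8', ':', '3', '0'] : List Char) ≤ (['0', '9', ':', '0', '0'] : List Char)) (not_le.mp h2)
    have p2 : (['0', '9', ':', '0', '0'] : List Char) < t := not_le.mp h2
    have n3 : ¬ ((['0', '9', ':', '3', '0'] : List Char) < t) := not_lt.mpr h3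
    have n4 : ¬ ((['1', '0', ':', '0', '0'] : List Char) < t) := not_lt.mpr (le_trans h3 (by decide : (['0', '9', ':', '3', '0'] : List Char) ≤ (['1', '0', ':', '0', '0'] : List Char)))
    have n5 : ¬ ((['1', '0', ':', '3', '0'] : List Char) < t) := not_lt.mpr (le_trans h3 (by decide : (['0', '9', ':', '3', '0'] : List Char) ≤ (['1', '0', ':', '3', '0'] : List Char)))
    have hb : bsearchB t 0 6 = 3 := by
      rw [bsearchB]; simp [CHECKPOINTS, p0, p1, p2, n3, n4, n5]
      rw [bsearchB]; simp [CHECKPOINTS, p0, p1, p2, n3, n4, n5]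
      rw [bsearchB]; simp [CHECKPOINTS, p0, p1, p2, n3, n4, n5]
      rw [bsearchB]; simp
    simp [scanA, CHECKPOINTS, hb, h0, h1, h2, h3]
  by_cases h4 : t ≤ (['1', '0', ':', '0', '0'] : List Char)
  · have p0 : (['0', '8', ':', '0', '0'] : List Char) < t := lt_of_le_of_lt (by decide : (['0', '8', ':', '0', '0'] : List Char) ≤ (['0', '9', ':', '3', '0'] : List Char)) (not_le.mp h3)
    have p1 : (['0', '8', ':', '3', '0'] : List Char) < t := lt_of_le_of_lt (by decide : (['0', '8', ':', '3', '0'] : List Char) ≤ (['0', '9', ':', '3', '0'] : List Char)) (not_le.mp h3)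
    have p2 : (['0', '9', ':', '0', '0'] : List Char) < t := lt_of_le_of_lt (by decide : (['0', '9', ':', '0', '0'] : List Char) ≤ (['0', '9', ':', '3', '0'] : List Char)) (not_le.mp h3)
    have p3 : (['0', '9', ':', '3', '0'] : List Char) < t := not_le.mp h3
    have n4 : ¬ ((['1', '0', ':', '0', '0'] : List Char) < t) := not_lt.mpr h4
    have n5 : ¬ ((['1', '0', ':', '3', '0'] : List Char) < t) := not_lt.mpr (le_trans h4 (by decide : (['1', '0', ':', '0', '0'] : List Char) ≤ (['1', '0', ':', '3', '0'] : List Char)))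
    have hb : bsearchB t 0 6 = 4 := by
      rw [bsearchB]; simp [CHECKPOINTS, p0, p1, p2, p3, n4, n5]
      rw [bsearchB]; simp [CHECKPOINTS, p0, p1, p2, p3, n4, n5]
      rw [bsearchB]; simp [CHECKPOINTS, p0, p1, p2, p3, n4, n5]
      rw [bsearchB]; simp
    simp [scanA, CHECKPOINTS, hb, h0, h1, h2, h3, h4]
  by_cases h5 : t ≤ (['1', '0', ':', '3', '0'] : List Char)
  · have p0 : (['0', '8', ':', '0', '0'] : List Char) < t := lt_of_le_of_lt (by decide : (['0', '8', ':', '0', '0'] : List Char) ≤ (['1', '0', ':', '0', '0'] : List Char)) (not_le.mp h4)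
    have p1 : (['0', '8', ':', '3', '0'] : List Char) < t := lt_of_le_of_lt (by decide : (['0', '8', ':', '3', '0'] : List Char) ≤ (['1', '0', ':', '0', '0'] : List Char)) (not_le.mp h4)
    have p2 : (['0', '9', ':', '0', '0'] : List Char) < t := lt_of_le_of_lt (by decide : (['0', '9', ':', '0', '0'] : List Char) ≤ (['1', '0', ':', '0', '0'] : List Char)) (not_le.mp h4)
    have p3 : (['0', '9', ':', '3', '0'] : List Char) < t := lt_of_le_of_lt (by decide : (['0', '9', ':', '3', '0'] : List Char) ≤ (['1', '0', ':', '0', '0'] : List Char)) (not_le.mp h4)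
    have p4 : (['1', '0', ':', '0', '0'] : List Char) < t := not_le.mp h4
    have n5 : ¬ ((['1', '0', ':', '3', '0'] : List Char) < t) := not_lt.mpr h5
    have hb : bsearchB t 0 6 = 5 := by
      rw [bsearchB]; simp [CHECKPOINTS, p0, p1, p2, p3, p4, n5]
      rw [bsearchB]; simp [CHECKPOINTS, p0, p1, p2, p3, p4, n5]
      rw [bsearchB]; simp [CHECKPOINTS, p0, p1, p2, p3, p4, n5]
      rw [bsearchB]; simp
    simp [scanA, CHECKPOINTS, hb, h0, h1, h2, h3, h4, h5]
  have p0 : (['0', '8', ':', '0', '0'] : List Char) < t := lt_of_le_of_lt (by decide : (['0', '8', ':', '0', '0'] : List Char) ≤ (['1', '0', ':', '3', '0'] : List Char)) (not_le.mp h5)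
  have p1 : (['0', '8', ':', '3', '0'] : List Char) < t := lt_of_le_of_lt (by decide : (['0', '8', ':', '3', '0'] : List Char) ≤ (['1', '0', ':', '3', '0'] : List Char)) (not_le.mp h5)
  have p2 : (['0', '9', ':', '0', '0'] : List Char) < t := lt_of_le_of_lt (by decide : (['0', '9', ':', '0', '0'] : List Char) ≤ (['1', '0', ':', '3', '0'] : List Char)) (not_le.mp h5)
  have p3 : (['0', '9', ':', '3', '0'] : List Char) < t := lt_of_le_of_lt (by decide : (['0', '9', ':', '3', '0'] : List Char) ≤ (['1', '0', ':', '3', '0'] : List Char)) (not_le.mp h5)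
  have p4 : (['1', '0', ':', '0', '0'] : List Char) < t := lt_of_le_of_lt (by decide : (['1', '0', ':', '0', '0'] : List Char) ≤ (['1', '0', ':', '3', '0'] : List Char)) (not_le.mp h5)
  have p5 : (['1', '0', ':', '3', '0'] : List Char) < t := not_le.mp h5
  have hb : bsearchB t 0 6 = 6 := by
    rw [bsearchB]; simp [CHECKPOINTS, p0, p1, p2, p3, p4, p5]
    rw [bsearchB]; simp [CHECKPOINTS, p0, p1, p2, p3, p4, p5]
    rw [bsearchB]; simp
  simp [scanA, CHECKPOINTS, hb, h0, h1, h2, h3, h4, h5]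


-- ===== VERDICT (by name: the statement is the Claim_ definition above) =====
theorem checkpoint_for_spec : Claim_equal_checkpoint_for := by
  intro t _
  unfold Spec_checkpoint_for checkpoint_for checkpoint_for_alt
  split_ifs with hg hl
  · rfl
  · rfl
  · exact scan_eq_bsearch t.toList
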